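-- pv_equiv track=rewrite | github.com/CodyBuilder-dev/Algorithm-Coding-Test | problems/self-study/http-packet-1.py | solution_realtime
-- ===== SOURCE A (Python) =====
-- from queue import PriorityQueue
--
-- class TupleQueue:
--     def __init__(self):
--         self.pq = PriorityQueue()
--
--     def put(self, tuple):
--         self.pq.put((tuple[1],tuple[0]))
--
--     def get(self):
--         result = self.pq.get()
--         return result[1], result[0]
--
--     def empty(self):
--         return self.pq.empty()
--
-- def solution_realtime(packets):
--     pq = TupleQueue()
--     for packet in packets:
--         pq.put(packet)
--
--     answer = ""
--     while not pq.empty():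
--         answer += pq.get()[0]
--
--     return answer
-- ===== SOURCE B (Python) =====
-- def solution_realtime(packets):
--     ordered = sorted(packets, key=lambda p: (p[1], p[0]))
--     return ''.join(p[0] for p in ordered)
-- ===== Notes on version B (the rewrite author's own statement) =====
-- stated objective: simpler
-- what changed: Replaced the TupleQueue/PriorityQueue machinery (push all, then repeatedly pop the minimum while building the answer with string +=) by a single sorted() with the compound key (priority, data) followed by one ''.join.
import Mathlib
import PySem

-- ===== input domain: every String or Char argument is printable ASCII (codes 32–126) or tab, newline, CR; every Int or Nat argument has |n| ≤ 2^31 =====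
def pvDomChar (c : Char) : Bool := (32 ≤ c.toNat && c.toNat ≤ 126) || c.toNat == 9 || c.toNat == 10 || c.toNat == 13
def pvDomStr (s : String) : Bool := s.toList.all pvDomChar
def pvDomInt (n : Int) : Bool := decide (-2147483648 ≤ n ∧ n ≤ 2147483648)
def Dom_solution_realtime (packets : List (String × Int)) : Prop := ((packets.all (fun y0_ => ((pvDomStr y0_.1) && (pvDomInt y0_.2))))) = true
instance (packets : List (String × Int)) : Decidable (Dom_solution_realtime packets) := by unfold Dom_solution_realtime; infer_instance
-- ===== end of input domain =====

-- B replaces A's priority-queue loop (push all, then repeatedly pop the minimum while a string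
-- accumulator grows) by one sorted() with the compound key (priority, data) and a single join;
-- objective: simpler.

-- ===== PORT A =====
-- A's PriorityQueue stores the pairs swapped as (priority, data) and pops the lexicographically
-- smallest; we keep the packets unswapped and compare (p.2, p.1), which is the same ordering.
-- Python's tuple/str comparison is lexicographic by code point: exact here.
def pvPairLt (a b : String × Int) : Bool := decide (a.2 < b.2 ∨ (a.2 = b.2 ∧ a.1 < b.1))

-- pq.get(): extract the minimal element (first minimal occurrence; ties are identical pairs).
def pvPopMin : (String × Int) → List (String × Int) → ((String × Int) × List (String × Int))
  | m, [] => (m, [])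
  | m, x :: xs =>
    if pvPairLt x m then
      let r := pvPopMin x xs
      (r.1, m :: r.2)
    else
      let r := pvPopMin m xs
      (r.1, x :: r.2)

-- needed by pvDrain's termination proof
theorem pvPopMin_length (m : String × Int) (xs : List (String × Int)) :
    (pvPopMin m xs).2.length = xs.length := by
  induction xs generalizing m with
  | nil => rfl
  | cons x xs ih =>
    simp only [pvPopMin]
    split <;> simp [ih]

-- 'while not pq.empty(): answer += pq.get()[0]' — the String accumulator is built on List Char
-- (Lean's own String.append is kernel-opaque), exact.
def pvDrain : List (String × Int) → List Char
  | [] => []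
  | x :: xs =>
    let r := pvPopMin x xs
    r.1.1.toList ++ pvDrain r.2
termination_by pq => pq.length
decreasing_by simp [pvPopMin_length]

def solution_realtime (packets : List (String × Int)) : String :=
  let pq := packets.foldl (fun pq packet => pq ++ [packet]) []
  String.ofList (pvDrain pq)

-- ===== PORT B =====
def solution_realtime_alt (packets : List (String × Int)) : String :=
  let ordered := PySem.List.sorted2 packets (fun p => p.2) (fun p => p.1)
  PySem.Str.join "" (ordered.map (fun p => p.1))

-- ===== PRECONDITION & SPEC =====
def Spec_solution_realtime (packets : List (String × Int)) (out : String) : Prop := out = solution_realtime_alt packets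
instance (packets : List (String × Int)) (out : String) : Decidable (Spec_solution_realtime packets out) := by unfold Spec_solution_realtime; infer_instance

-- ===== CLAIM (what is proved, stated in full; the proofs are below) =====
def Claim_equal_solution_realtime : Prop := ∀ (packets : List (String × Int)), Dom_solution_realtime packets → Spec_solution_realtime packets (solution_realtime packets)

-- ===== LEMMAS AND PROOFS =====

-- the total order A's PriorityQueue uses, packaged as one key
def pvKey (p : String × Int) : Lex (Int × String) := toLex (p.2, p.1)

theorem pvKey_inj : Function.Injective pvKey := by
  intro a b h
  have h2 : (a.2, a.1) = (b.2, b.1) := toLex.injective h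
  cases a; cases b; simp_all

theorem pvPairLt_eq_key (a b : String × Int) : pvPairLt a b = decide (pvKey a < pvKey b) := by
  simp [pvPairLt, pvKey, Prod.Lex.lt_iff]

theorem pvSorted2_eq_sorted (packets : List (String × Int)) :
    PySem.List.sorted2 packets (fun p => p.2) (fun p => p.1)
      = PySem.List.sorted packets pvKey := by
  have hb : (fun (a b : String × Int) =>
        decide (a.2 < b.2) || (!decide (b.2 < a.2) && decide (a.1 < b.1)))
      = fun a b => decide (pvKey a < pvKey b) := by
    funext a b
    by_cases h1 : a.2 < b.2 <;> by_cases h2 : b.2 < a.2 <;>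
      simp [pvKey, Prod.Lex.lt_iff, h1, h2] <;> omega
  simp only [PySem.List.sorted2, PySem.List.sorted, if_neg (by decide : ¬ (false = true))]
  rw [hb]

theorem pvPopMin_perm (m : String × Int) (xs : List (String × Int)) :
    ((pvPopMin m xs).1 :: (pvPopMin m xs).2).Perm (m :: xs) := by
  induction xs generalizing m with
  | nil => rfl
  | cons x xs ih =>
    simp only [pvPopMin]
    split
    · exact (List.Perm.swap m (pvPopMin x xs).1 (pvPopMin x xs).2).trans
        ((ih x).cons m)
    · exact ((List.Perm.swap x (pvPopMin m xs).1 (pvPopMin m xs).2).trans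
        ((ih m).cons x)).trans (List.Perm.swap m x xs)

theorem pvPopMin_min (m : String × Int) (xs : List (String × Int)) :
    ∀ y ∈ m :: xs, pvKey (pvPopMin m xs).1 ≤ pvKey y := by
  induction xs generalizing m with
  | nil =>
    intro y hy
    simp only [List.mem_singleton] at hy
    simp [pvPopMin, hy]
  | cons x xs ih =>
    intro y hy
    have hlt := pvPairLt_eq_key x m
    simp only [pvPopMin]
    split
    · rename_i h
      rw [hlt] at h
      have hxm : pvKey x < pvKey m := of_decide_eq_true h
      rcases List.mem_cons.1 hy with rfl | hy'
      · exact le_trans (ih x x List.mem_cons_self) (le_of_lt hxm)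
      · exact ih x y hy'
    · rename_i h
      rw [hlt] at h
      have hmx : pvKey m ≤ pvKey x := not_lt.1 (by simpa using h)
      rcases List.mem_cons.1 hy with rfl | hy'
      · exact ih y y List.mem_cons_self
      · rcases List.mem_cons.1 hy' with rfl | hy''
        · exact le_trans (ih m m List.mem_cons_self) hmx
        · exact ih m y (List.mem_cons_of_mem m hy'')

theorem pvSorted_cons_popMin (x : String × Int) (xs : List (String × Int)) :
    PySem.List.sorted (x :: xs) pvKey
      = (pvPopMin x xs).1 :: PySem.List.sorted (pvPopMin x xs).2 pvKey := by
  have p1 : (PySem.List.sorted (x :: xs) pvKey).Perm (x :: xs) :=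
    PySem.List.sorted_perm _ _ _
  have p2 : ((pvPopMin x xs).1 :: PySem.List.sorted (pvPopMin x xs).2 pvKey).Perm (x :: xs) :=
    ((PySem.List.sorted_perm _ _ _).cons _).trans (pvPopMin_perm x xs)
  apply PySem.List.eq_of_perm_of_pairwise_le_of_injective pvKey pvKey_inj
    (p1.trans p2.symm)
  · exact PySem.List.sorted_pairwise _ _
  · refine List.Pairwise.cons ?_ (PySem.List.sorted_pairwise _ _)
    intro y hy
    have hy2 : y ∈ (pvPopMin x xs).2 :=
      ((PySem.List.sorted_perm (pvPopMin x xs).2 pvKey false).mem_iff).1 hy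
    have hym : y ∈ x :: xs := ((pvPopMin_perm x xs).mem_iff).1 (List.mem_cons_of_mem _ hy2)
    exact pvPopMin_min x xs y hym

theorem pvDrain_eq_sorted (pq : List (String × Int)) :
    pvDrain pq = (PySem.List.sorted pq pvKey).flatMap (fun p => p.1.toList) := by
  induction hn : pq.length using Nat.strong_induction_on generalizing pq with
  | _ n ih =>
    cases pq with
    | nil => rw [pvDrain]; simp [PySem.List.sorted]
    | cons x xs =>
      have hlen : (pvPopMin x xs).2.length < n := by
        rw [← hn]; simp [pvPopMin_length]
      rw [pvDrain, pvSorted_cons_popMin, List.flatMap_cons,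
        ← ih _ hlen _ rfl]

theorem pvIntercalate_nil (l : List (List Char)) : [].intercalate l = l.flatten := by
  induction l with
  | nil => rfl
  | cons x xs ih => cases xs <;> simp_all [List.intercalate]

theorem pv_main (packets : List (String × Int)) :
    solution_realtime packets = solution_realtime_alt packets := by
  show String.ofList (pvDrain (packets.foldl (fun pq packet => pq ++ [packet]) []))
      = PySem.Str.join ""
          ((PySem.List.sorted2 packets (fun p => p.2) (fun p => p.1)).map (fun p => p.1))
  rw [PySem.List.foldl_append_singleton_eq_self, List.nil_append,
    pvSorted2_eq_sorted, pvDrain_eq_sorted]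
  simp [PySem.Str.join, PySem.Chars.join, List.flatMap_def, List.map_map,
    Function.comp_def, pvIntercalate_nil]

-- ===== VERDICT (by name: the statement is the Claim_ definition above) =====
theorem solution_realtime_spec : Claim_equal_solution_realtime := by
  intro packets _
  exact pv_main packets
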